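-- pv_equiv track=rewrite | github.com/ericblois/NBAPredictor | Calculations.py | roster_diff
-- ===== SOURCE A (Python) =====
-- def mp_to_sec(mp: str) -> int:
--     mp = mp.split(':')
--     try:
--         return int(mp[0]) * 60 + int(mp[1])
--     except:
--         return 0
--
-- def roster_diff(roster1: dict[str: str], roster2: dict[str: str]):
--     r1 = roster1.copy()
--     r2 = roster2.copy()
--     sec_diff = 0
--     for player, time in r1.items():
--         try:
--             time2 = r2[player]
--             sec_diff += abs(mp_to_sec(time) - mp_to_sec(time2))
--             del r2[player]
--         except:
--             sec_diff += mp_to_sec(time)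
--     for time in r2.values():
--         sec_diff += mp_to_sec(time)
--     return sec_diff
-- ===== SOURCE B (Python) =====
-- def mp_to_sec(mp: str) -> int:
--     mp = mp.split(':')
--     try:
--         return int(mp[0]) * 60 + int(mp[1])
--     except:
--         return 0
--
-- def roster_diff(roster1: dict, roster2: dict):
--     items1 = sorted(roster1.items(), key=lambda kv: kv[0])
--     items2 = sorted(roster2.items(), key=lambda kv: kv[0])
--     i = j = 0
--     total = 0
--     while i < len(items1) and j < len(items2):
--         (k1, t1), (k2, t2) = items1[i], items2[j]
--         if k1 == k2:
--             total += abs(mp_to_sec(t1) - mp_to_sec(t2))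
--             i += 1
--             j += 1
--         elif k1 < k2:
--             total += mp_to_sec(t1)
--             i += 1
--         else:
--             total += mp_to_sec(t2)
--             j += 1
--     while i < len(items1):
--         total += mp_to_sec(items1[i][1])
--         i += 1
--     while j < len(items2):
--         total += mp_to_sec(items2[j][1])
--         j += 1
--     return total
-- ===== Notes on version B (the rewrite author's own statement) =====
-- stated objective: alternative
-- what changed: Replaces A's two-phase mutating scan (copy both dicts, loop over roster1 with try/except lookup-and-delete consuming roster2, then a second loop over the leftovers) with a sort-then-merge algorithm: sort both item lists by player and walk them with two pointers, matching equal keys and flushing the tails.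
import Mathlib
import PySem

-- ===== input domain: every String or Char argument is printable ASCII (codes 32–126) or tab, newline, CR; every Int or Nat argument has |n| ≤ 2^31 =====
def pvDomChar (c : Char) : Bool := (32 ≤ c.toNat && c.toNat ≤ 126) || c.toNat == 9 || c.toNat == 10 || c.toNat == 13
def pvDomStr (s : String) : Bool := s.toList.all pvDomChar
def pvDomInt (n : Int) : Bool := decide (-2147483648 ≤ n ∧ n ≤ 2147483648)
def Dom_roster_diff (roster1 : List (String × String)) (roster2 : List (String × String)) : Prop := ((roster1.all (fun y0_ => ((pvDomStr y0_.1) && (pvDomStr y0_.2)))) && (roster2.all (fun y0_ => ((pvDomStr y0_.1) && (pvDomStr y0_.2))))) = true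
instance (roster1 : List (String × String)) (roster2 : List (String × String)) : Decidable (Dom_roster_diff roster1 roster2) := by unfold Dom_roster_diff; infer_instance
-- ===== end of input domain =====

-- B replaces A's two-phase mutating scan (try/except lookup-and-delete consuming a copy of
-- roster2, then a second loop over the leftovers) with a sort-then-merge algorithm: both item
-- lists sorted by player, walked with two pointers; objective: alternative.

-- shared helper, used verbatim by both Pythons (mp_to_sec)
def mpToSec (mp : String) : Int :=
  -- sep ":" is nonempty, so split? is always `some`
  let parts := (PySem.Str.split? mp ":").getD []
  -- try: int(parts[0]) * 60 + int(parts[1]) except: 0  (IndexError or ValueError → 0)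
  match PySem.List.pyGet? parts 0, PySem.List.pyGet? parts 1 with
  | some a, some b =>
    match PySem.Int.ofStr? a, PySem.Int.ofStr? b with
    | some x, some y => x * 60 + y
    | _, _ => 0
  | _, _ => 0

-- ===== PORT A =====
def roster_diff (roster1 : List (String × String)) (roster2 : List (String × String)) : Int :=
  let r1 := PySem.Dict.ofList roster1
  let r2 := PySem.Dict.ofList roster2
  -- first loop: for player, time in r1.items(): try lookup+delete in r2, except add full time
  let st := r1.items.foldl (fun (st : Int × PySem.Dict String String) pt =>
    match st.2.get? pt.1 with
    | some time2 => (st.1 + |mpToSec pt.2 - mpToSec time2|, st.2.erase pt.1)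
    | none => (st.1 + mpToSec pt.2, st.2)) (0, r2)
  -- second loop: for time in r2.values(): sec_diff += mp_to_sec(time)
  st.2.values.foldl (fun s t => s + mpToSec t) st.1

-- ===== PORT B =====
-- B's three while loops: the two-pointer walk consumes the two sorted lists; each tail loop is a fold
def pvMerge : List (String × String) → List (String × String) → Int → Int
  | [], l2, total => l2.foldl (fun t q => t + mpToSec q.2) total
  | p :: l1, [], total => (p :: l1).foldl (fun t q => t + mpToSec q.2) total
  | p :: l1, q :: l2, total =>
    if p.1 = q.1 then pvMerge l1 l2 (total + |mpToSec p.2 - mpToSec q.2|)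
    else if p.1 < q.1 then pvMerge l1 (q :: l2) (total + mpToSec p.2)
    else pvMerge (p :: l1) l2 (total + mpToSec q.2)
  termination_by l1 l2 => l1.length + l2.length

def roster_diff_alt (roster1 : List (String × String)) (roster2 : List (String × String)) : Int :=
  let items1 := PySem.List.sorted (PySem.Dict.ofList roster1).items (fun kv => kv.1) false
  let items2 := PySem.List.sorted (PySem.Dict.ofList roster2).items (fun kv => kv.1) false
  pvMerge items1 items2 0

-- ===== PRECONDITION & SPEC =====
def Spec_roster_diff (roster1 : List (String × String)) (roster2 : List (String × String)) (out : Int) : Prop := out = roster_diff_alt roster1 roster2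
instance (roster1 : List (String × String)) (roster2 : List (String × String)) (out : Int) : Decidable (Spec_roster_diff roster1 roster2 out) := by unfold Spec_roster_diff; infer_instance

-- ===== CLAIM (what is proved, stated in full; the proofs are below) =====
def Claim_equal_roster_diff : Prop := ∀ (roster1 : List (String × String)) (roster2 : List (String × String)), Dom_roster_diff roster1 roster2 → Spec_roster_diff roster1 roster2 (roster_diff roster1 roster2)

-- ===== LEMMAS AND PROOFS =====

-- contribution of one roster1 item against a list of roster2 items (first-match lookup)
def pvContribL (l2 : List (String × String)) (p : String × String) : Int :=
  match l2.find? (fun q => q.1 == p.1) with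
  | some q => |mpToSec p.2 - mpToSec q.2|
  | none => mpToSec p.2

-- the canonical value both programs compute
def pvCanon (l1 l2 : List (String × String)) : Int :=
  (l1.map (pvContribL l2)).sum
  + ((l2.filter (fun q => !(l1.map Prod.fst).contains q.1)).map (fun q => mpToSec q.2)).sum

-- contribution against a Dict, as A's first loop sees it
def pvContrib (d2 : PySem.Dict String String) (p : String × String) : Int :=
  match d2.get? p.1 with
  | some t2 => |mpToSec p.2 - mpToSec t2|
  | none => mpToSec p.2

theorem pv_get?_erase_of_ne {κ ν : Type} [BEq κ] [LawfulBEq κ] (d : PySem.Dict κ ν) (k k' : κ)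
    (h : k' ≠ k) : (d.erase k).get? k' = d.get? k' := by
  obtain ⟨items⟩ := d
  simp only [PySem.Dict.erase, PySem.Dict.get?]
  congr 1
  induction items with
  | nil => rfl
  | cons p rest ih =>
    by_cases hp : p.1 = k
    · have hk : (k == k') = false := beq_eq_false_iff_ne.mpr (fun e => h e.symm)
      have hpk : (p.1 == k) = true := by simp [hp]
      simp [hp, hk, ih]
    · have hpk : (p.1 == k) = false := beq_eq_false_iff_ne.mpr hp
      by_cases hq : p.1 = k'
      · have hq' : (p.1 == k') = true := by simp [hq]
        simp [hpk, hq']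
      · simp [hpk, hq, ih]

-- erasing an absent key is a no-op
theorem pv_erase_of_get?_none (d : PySem.Dict String String) (k : String)
    (h : d.get? k = none) : d.erase k = d := by
  apply PySem.Dict.ext
  simp only [PySem.Dict.get?, Option.map_eq_none_iff, List.find?_eq_none] at h
  simp only [PySem.Dict.erase]
  exact List.filter_eq_self.mpr (fun p hp => by simp [h p hp])

-- the erase-all loop filters roster2's items by non-membership of the key in ks
theorem pv_eraseFold (ks : List String) (d : PySem.Dict String String) :
    (ks.foldl PySem.Dict.erase d).items = d.items.filter (fun q => !ks.contains q.1) := by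
  induction ks generalizing d with
  | nil => simp
  | cons k ks ih =>
    simp only [List.foldl_cons, ih, PySem.Dict.erase, List.filter_filter]
    apply List.filter_congr
    intro q _
    simp only [List.contains_cons, Bool.not_or, Bool.and_comm]

-- A's first loop computed: sum of contributions plus erase-all state
theorem pv_loopA (items : List (String × String)) (d2 : PySem.Dict String String) (acc : Int)
    (hnd : (items.map Prod.fst).Nodup) :
    items.foldl (fun (st : Int × PySem.Dict String String) pt =>
      match st.2.get? pt.1 with
      | some time2 => (st.1 + |mpToSec pt.2 - mpToSec time2|, st.2.erase pt.1)
      | none => (st.1 + mpToSec pt.2, st.2)) (acc, d2)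
    = (acc + (items.map (pvContrib d2)).sum,
       (items.map Prod.fst).foldl PySem.Dict.erase d2) := by
  induction items generalizing d2 acc with
  | nil => simp
  | cons p rest ih =>
    simp only [List.map_cons, List.nodup_cons, List.mem_map] at hnd
    obtain ⟨hp, hrest⟩ := hnd
    have hc : ∀ q ∈ rest, pvContrib (d2.erase p.1) q = pvContrib d2 q := by
      intro q hq
      have : q.1 ≠ p.1 := fun h => hp ⟨q, hq, h⟩
      simp [pvContrib, pv_get?_erase_of_ne _ _ _ this]
    simp only [List.foldl_cons, List.map_cons, List.sum_cons]
    cases hg : d2.get? p.1 with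
    | some t2 =>
      rw [ih _ _ hrest, List.map_congr_left hc]
      simp [pvContrib, hg, add_assoc]
    | none =>
      rw [pv_erase_of_get?_none _ _ hg, ih _ _ hrest]
      simp [pvContrib, hg, add_assoc]

-- with any dict, the lookup is the first-match scan over its items
theorem pv_contrib_eq (d2 : PySem.Dict String String) (p : String × String) :
    pvContrib d2 p = pvContribL d2.items p := by
  simp only [pvContrib, pvContribL, PySem.Dict.get?]
  cases d2.items.find? (fun q => q.1 == p.1) <;> simp

-- a key not matched by the head passes over it
theorem pv_contribL_cons_ne (q : String × String) (l2 : List (String × String))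
    (p : String × String) (h : q.1 ≠ p.1) : pvContribL (q :: l2) p = pvContribL l2 p := by
  rw [pvContribL, pvContribL, List.find?_cons_of_neg (by simp [h])]

-- a key absent from l2 contributes its own seconds
theorem pv_contribL_not_mem (l2 : List (String × String)) (p : String × String)
    (h : ∀ y ∈ l2, y.1 ≠ p.1) : pvContribL l2 p = mpToSec p.2 := by
  have : l2.find? (fun q => q.1 == p.1) = none :=
    List.find?_eq_none.mpr (fun x hx => by simp [h x hx])
  simp [pvContribL, this]

-- first-match lookup is permutation-invariant when keys are Nodup
theorem pv_find?_perm (l l' : List (String × String)) (k : String)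
    (hperm : l.Perm l') (hnd : (l.map Prod.fst).Nodup) :
    l.find? (fun q => q.1 == k) = l'.find? (fun q => q.1 == k) := by
  cases hf : l.find? (fun q => q.1 == k) with
  | none =>
    rw [List.find?_eq_none] at hf
    rw [eq_comm, List.find?_eq_none]
    intro x hx
    exact hf x (hperm.symm.mem_iff.mp hx)
  | some q =>
    have hk : q.1 = k := by simpa using List.find?_some hf
    have hqm : q ∈ l := List.mem_of_find?_eq_some hf
    cases hf' : l'.find? (fun q => q.1 == k) with
    | none =>
      rw [List.find?_eq_none] at hf'
      exact absurd (by simpa using hf' q (hperm.mem_iff.mp hqm)) (by simp [hk])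
    | some q' =>
      have hk' : q'.1 = k := by simpa using List.find?_some hf'
      have hq'l : q' ∈ l := hperm.symm.mem_iff.mp (List.mem_of_find?_eq_some hf')
      have := List.inj_on_of_nodup_map hnd hqm hq'l (by rw [hk, hk'])
      rw [this]

-- sorted-by-key + Nodup keys gives strictly increasing keys
theorem pv_pairwise_lt (l : List (String × String))
    (hle : l.Pairwise (fun a b => a.1 ≤ b.1)) (hnd : (l.map Prod.fst).Nodup) :
    l.Pairwise (fun a b => a.1 < b.1) := by
  have hne : l.Pairwise (fun a b => a.1 ≠ b.1) := (List.pairwise_map).mp hnd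
  exact (hle.and hne).imp (fun h => lt_of_le_of_ne h.1 h.2)

-- the two-pointer walk over strictly key-sorted lists computes the canonical value
theorem pv_merge_eq : ∀ (l1 l2 : List (String × String)) (total : Int),
    l1.Pairwise (fun a b => a.1 < b.1) → l2.Pairwise (fun a b => a.1 < b.1) →
    pvMerge l1 l2 total = total + pvCanon l1 l2 := by
  intro l1 l2 total
  induction l1, l2, total using pvMerge.induct with
  | case1 l2 total =>
    intro _ _
    simp [pvMerge, pvCanon, PySem.List.foldl_add]
  | case2 p l1 total =>
    intro _ _
    have hc : ∀ x ∈ p :: l1, pvContribL [] x = mpToSec x.2 := fun x _ =>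
      pv_contribL_not_mem [] x (by simp)
    rw [show pvMerge (p :: l1) [] total = (p :: l1).foldl (fun t q => t + mpToSec q.2) total
        from by simp [pvMerge]]
    rw [PySem.List.foldl_add]
    simp [pvCanon, List.map_congr_left hc]
  | case3 p l1 q l2 total heq ih =>
    intro h1 h2
    obtain ⟨hp, h1'⟩ := List.pairwise_cons.mp h1
    obtain ⟨hq, h2'⟩ := List.pairwise_cons.mp h2
    rw [show pvMerge (p :: l1) (q :: l2) total
          = pvMerge l1 l2 (total + |mpToSec p.2 - mpToSec q.2|) from by simp [pvMerge, heq]]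
    rw [ih h1' h2']
    have e1 : pvContribL (q :: l2) p = |mpToSec p.2 - mpToSec q.2| := by
      rw [pvContribL, List.find?_cons_of_pos (by simp [heq])]
    have e2 : l1.map (pvContribL (q :: l2)) = l1.map (pvContribL l2) :=
      List.map_congr_left fun x hx =>
        pv_contribL_cons_ne q l2 x (heq ▸ ne_of_lt (hp x hx))
    have e3 : (q :: l2).filter (fun y => !(((p :: l1).map Prod.fst).contains y.1))
        = l2.filter (fun y => !((l1.map Prod.fst).contains y.1)) := by
      rw [List.filter_cons]
      have hqc : (((p :: l1).map Prod.fst).contains q.1) = true := by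
        simp [List.contains_eq_mem, heq.symm]
      rw [if_neg (by rw [hqc]; simp)]
      refine List.filter_congr fun y hy => ?_
      have hne : y.1 ≠ p.1 := by
        have := hq y hy
        rw [← heq] at this
        exact (ne_of_lt this).symm
      simp [List.contains_eq_mem, hne]
    unfold pvCanon
    rw [e3]
    simp only [List.map_cons, List.sum_cons]
    rw [e1, e2]
    ring
  | case4 p l1 q l2 total heq hlt ih =>
    intro h1 h2
    obtain ⟨hp, h1'⟩ := List.pairwise_cons.mp h1
    obtain ⟨hq, _⟩ := List.pairwise_cons.mp h2
    have hall : ∀ y ∈ q :: l2, y.1 ≠ p.1 := by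
      intro y hy
      rcases List.mem_cons.mp hy with rfl | hy'
      · exact (ne_of_lt hlt).symm
      · exact (ne_of_lt (lt_trans hlt (hq y hy'))).symm
    rw [show pvMerge (p :: l1) (q :: l2) total
          = pvMerge l1 (q :: l2) (total + mpToSec p.2) from by simp [pvMerge, heq, hlt]]
    rw [ih h1' h2]
    have e1 : pvContribL (q :: l2) p = mpToSec p.2 := pv_contribL_not_mem _ _ hall
    have e3 : (q :: l2).filter (fun y => !(((p :: l1).map Prod.fst).contains y.1))
        = (q :: l2).filter (fun y => !((l1.map Prod.fst).contains y.1)) :=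
      List.filter_congr fun y hy => by simp [List.contains_eq_mem, hall y hy]
    unfold pvCanon
    rw [e3]
    simp only [List.map_cons, List.sum_cons]
    rw [e1]
    ring
  | case5 p l1 q l2 total heq hnlt ih =>
    intro h1 h2
    obtain ⟨hp, _⟩ := List.pairwise_cons.mp h1
    obtain ⟨hq, h2'⟩ := List.pairwise_cons.mp h2
    have hgt : q.1 < p.1 := lt_of_le_of_ne (not_lt.mp hnlt) (fun e => heq e.symm)
    rw [show pvMerge (p :: l1) (q :: l2) total
          = pvMerge (p :: l1) l2 (total + mpToSec q.2) from by simp [pvMerge, heq, hnlt]]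
    rw [ih h1 h2']
    have e2 : (p :: l1).map (pvContribL (q :: l2)) = (p :: l1).map (pvContribL l2) :=
      List.map_congr_left fun x hx => by
        rcases List.mem_cons.mp hx with rfl | hx'
        · exact pv_contribL_cons_ne q l2 x (ne_of_lt hgt)
        · exact pv_contribL_cons_ne q l2 x (ne_of_lt (lt_trans hgt (hp x hx')))
    have e3 : (q :: l2).filter (fun y => !(((p :: l1).map Prod.fst).contains y.1))
        = q :: l2.filter (fun y => !(((p :: l1).map Prod.fst).contains y.1)) := by
      rw [List.filter_cons]
      have : (((p :: l1).map Prod.fst).contains q.1) = false := by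
        simp only [List.contains_eq_mem, decide_eq_false_iff_not, List.map_cons, List.mem_cons,
          List.mem_map, not_or]
        refine ⟨ne_of_lt hgt, ?_⟩
        rintro ⟨x, hx, hxq⟩
        exact lt_irrefl _ (hxq ▸ lt_trans hgt (hp x hx))
      rw [this]
      simp
    unfold pvCanon
    rw [e2, e3]
    simp only [List.map_cons, List.sum_cons]
    ring

-- the canonical value only depends on the lists up to permutation (given Nodup keys on l2's side)
theorem pv_canon_perm (s1 s2 d1i d2i : List (String × String))
    (hp1 : s1.Perm d1i) (hp2 : s2.Perm d2i) (hnd2 : (d2i.map Prod.fst).Nodup) :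
    pvCanon s1 s2 = pvCanon d1i d2i := by
  have hc : ∀ p, pvContribL s2 p = pvContribL d2i p := by
    intro p
    simp only [pvContribL, pv_find?_perm d2i s2 p.1 hp2.symm hnd2]
  have e1 : (s1.map (pvContribL s2)).sum = (d1i.map (pvContribL d2i)).sum := by
    rw [show s1.map (pvContribL s2) = s1.map (pvContribL d2i) from
      List.map_congr_left fun x _ => hc x]
    exact (hp1.map (pvContribL d2i)).sum_eq
  have epred : ∀ y : String × String,
      (!(s1.map Prod.fst).contains y.1) = (!(d1i.map Prod.fst).contains y.1) := by
    intro y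
    simp only [List.contains_eq_mem, (hp1.map Prod.fst).mem_iff]
  have e2 : ((s2.filter (fun q => !(s1.map Prod.fst).contains q.1)).map
        (fun q => mpToSec q.2)).sum
      = ((d2i.filter (fun q => !(d1i.map Prod.fst).contains q.1)).map
        (fun q => mpToSec q.2)).sum := by
    have h1 : s2.filter (fun q => !(s1.map Prod.fst).contains q.1)
        = s2.filter (fun q => !(d1i.map Prod.fst).contains q.1) :=
      List.filter_congr (fun y _ => epred y)
    have h2 := List.Perm.filter (fun q => !(d1i.map Prod.fst).contains q.1) hp2
    exact (congrArg (fun l => (l.map (fun q => mpToSec q.2)).sum) h1).trans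
      ((h2.map (fun q => mpToSec q.2)).sum_eq)
  simp only [pvCanon, e1, e2]

-- A computes the canonical value
theorem pv_A_canon (roster1 roster2 : List (String × String)) :
    roster_diff roster1 roster2
      = pvCanon (PySem.Dict.ofList roster1).items (PySem.Dict.ofList roster2).items := by
  unfold roster_diff
  dsimp only
  rw [pv_loopA _ _ 0 (PySem.Dict.nodup_keys_ofList roster1)]
  have hvals : (((PySem.Dict.ofList roster1).items.map Prod.fst).foldl PySem.Dict.erase
        (PySem.Dict.ofList roster2)).values
      = ((PySem.Dict.ofList roster2).items.filter
          (fun q => !((PySem.Dict.ofList roster1).items.map Prod.fst).contains q.1)).map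
          Prod.snd := by
    simp only [PySem.Dict.values, pv_eraseFold]
  rw [hvals, PySem.List.foldl_add]
  rw [List.map_congr_left (fun x _ => pv_contrib_eq (PySem.Dict.ofList roster2) x)]
  simp only [pvCanon, List.map_map, Function.comp_def, zero_add]

-- B computes the canonical value
theorem pv_B_canon (roster1 roster2 : List (String × String)) :
    roster_diff_alt roster1 roster2
      = pvCanon (PySem.Dict.ofList roster1).items (PySem.Dict.ofList roster2).items := by
  unfold roster_diff_alt
  dsimp only
  have hnd1 : ((PySem.Dict.ofList roster1).items.map Prod.fst).Nodup :=
    PySem.Dict.nodup_keys_ofList roster1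
  have hnd2 : ((PySem.Dict.ofList roster2).items.map Prod.fst).Nodup :=
    PySem.Dict.nodup_keys_ofList roster2
  have hp1 := PySem.List.sorted_perm (PySem.Dict.ofList roster1).items (fun kv => kv.1) false
  have hp2 := PySem.List.sorted_perm (PySem.Dict.ofList roster2).items (fun kv => kv.1) false
  have hnds1 := ((hp1.map Prod.fst).nodup_iff).mpr hnd1
  have hnds2 := ((hp2.map Prod.fst).nodup_iff).mpr hnd2
  rw [pv_merge_eq _ _ 0
      (pv_pairwise_lt _ (PySem.List.sorted_pairwise (PySem.Dict.ofList roster1).items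
        (fun kv => kv.1)) hnds1)
      (pv_pairwise_lt _ (PySem.List.sorted_pairwise (PySem.Dict.ofList roster2).items
        (fun kv => kv.1)) hnds2),
    pv_canon_perm _ _ _ _ hp1 hp2 hnd2, zero_add]

-- ===== VERDICT (by name: the statement is the Claim_ definition above) =====
theorem roster_diff_spec : Claim_equal_roster_diff := by
  intro roster1 roster2 _
  unfold Spec_roster_diff
  rw [pv_A_canon, pv_B_canon]
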